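-- pv_equiv track=rewrite | github.com/KaRaBe11a/Python | Проектище/Refactoring.py | COM_NN_D
-- ===== SOURCE A (Python) =====
-- def COM_NN_D(number1: str, number2: str):  # Сравнение натуральных чисел
--     number1 = str(number1)
--     number2 = str(number2)
--
--     if len(number1) != len(number2):  # Проверка на длинну что длиннее то и больше
--         return "2" if len(number1) > len(number2) else "1"
--
--     for i in range(len(number1)):  # Посимвольная проверка как только что-то разное проверяем и выдаём результат
--         if number1[i] != number2[i]:
--             return "2" if number1[i] > number2[i] else "1"
--
--     return "0"
-- ===== SOURCE B (Python) =====
-- def COM_NN_D(number1: str, number2: str):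
--     number1 = str(number1)
--     number2 = str(number2)
--     verdict = "0"
--     i = len(number1) - 1
--     j = len(number2) - 1
--     while i >= 0 and j >= 0:
--         if number1[i] != number2[j]:
--             verdict = "2" if number1[i] > number2[j] else "1"
--         i -= 1
--         j -= 1
--     if i >= 0:
--         return "2"
--     if j >= 0:
--         return "1"
--     return verdict
-- ===== Notes on version B (the rewrite author's own statement) =====
-- stated objective: alternative
-- what changed: Replaces A's length branch plus left-to-right first-difference early exit by a single right-to-left full pass with two cursors and an overwrite accumulator, where leftover characters on one side decide the unequal-length case.
import Mathlib
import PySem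

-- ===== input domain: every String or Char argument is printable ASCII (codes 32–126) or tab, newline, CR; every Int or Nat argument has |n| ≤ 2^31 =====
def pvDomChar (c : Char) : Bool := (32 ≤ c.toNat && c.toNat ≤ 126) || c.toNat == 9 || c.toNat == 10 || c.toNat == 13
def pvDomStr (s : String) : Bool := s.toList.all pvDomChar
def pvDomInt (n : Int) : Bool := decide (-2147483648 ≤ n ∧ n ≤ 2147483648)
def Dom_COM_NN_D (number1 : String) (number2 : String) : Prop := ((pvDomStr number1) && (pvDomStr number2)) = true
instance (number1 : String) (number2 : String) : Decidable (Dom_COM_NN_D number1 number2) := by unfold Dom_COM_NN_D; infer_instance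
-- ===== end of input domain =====

-- B replaces A's length branch + left-to-right early-exit scan by one right-to-left pass
-- with an overwrite accumulator, leftover characters deciding unequal lengths; objective: alternative.

-- ===== PORT A =====
-- the for-loop over range(len(number1)): first differing position decides; "0" if none
def comScanA : List Char → List Char → String
  | c1 :: r1, c2 :: r2 => if c1 ≠ c2 then (if c1 > c2 then "2" else "1") else comScanA r1 r2
  | _, _ => "0"

def COM_NN_D (number1 : String) (number2 : String) : String :=
  if number1.toList.length ≠ number2.toList.length then
    (if number1.toList.length > number2.toList.length then "2" else "1")
  else comScanA number1.toList number2.toList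

-- ===== PORT B =====
-- Source B's while loop walking both strings from the right: the lists here are the reversed
-- character lists, so head = current rightmost character; a leftover side means it is longer.
def scanB : List Char → List Char → String → String
  | c1 :: r1, c2 :: r2, v => scanB r1 r2 (if c1 ≠ c2 then (if c1 > c2 then "2" else "1") else v)
  | _ :: _, [], _ => "2"
  | [], _ :: _, _ => "1"
  | [], [], v => v

def COM_NN_D_alt (number1 : String) (number2 : String) : String :=
  scanB number1.toList.reverse number2.toList.reverse "0"

-- ===== PRECONDITION & SPEC =====
def Spec_COM_NN_D (number1 : String) (number2 : String) (out : String) : Prop := out = COM_NN_D_alt number1 number2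
instance (number1 : String) (number2 : String) (out : String) : Decidable (Spec_COM_NN_D number1 number2 out) := by unfold Spec_COM_NN_D; infer_instance

-- ===== CLAIM =====
def Claim_equal_COM_NN_D : Prop := ∀ (number1 : String) (number2 : String), Dom_COM_NN_D number1 number2 → Spec_COM_NN_D number1 number2 (COM_NN_D number1 number2)

-- ===== LEMMAS AND PROOFS =====
-- unequal lengths: B's leftover side decides, matching A's length branch
theorem scanB_ne_len (l1 l2 : List Char) (v : String) (h : l1.length ≠ l2.length) :
    scanB l1 l2 v = (if l1.length > l2.length then "2" else "1") := by
  induction l1 generalizing l2 v with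
  | nil =>
    cases l2 with
    | nil => simp at h
    | cons b bs => simp [scanB]
  | cons a as ih =>
    cases l2 with
    | nil => simp [scanB]
    | cons b bs =>
      simp only [List.length_cons, ne_eq, Nat.add_right_cancel_iff] at h
      simp only [scanB, List.length_cons, gt_iff_lt, Nat.add_lt_add_iff_right]
      exact ih bs _ h

-- the rightmost pair is processed last and overwrites the accumulator
theorem scanB_snoc (x y : List Char) (a b : Char) (v : String) (h : x.length = y.length) :
    scanB (x ++ [a]) (y ++ [b]) v
      = (if a ≠ b then (if a > b then "2" else "1") else scanB x y v) := by
  induction x generalizing y v with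
  | nil =>
    cases y with
    | nil => by_cases hab : a = b <;> simp [scanB, hab]
    | cons c cs => simp at h
  | cons c cs ih =>
    cases y with
    | nil => simp at h
    | cons d ds =>
      simp only [List.length_cons, Nat.add_right_cancel_iff] at h
      simp only [List.cons_append, scanB]
      rw [ih ds _ h]

-- equal lengths: the right-to-left overwrite pass computes the leftmost difference
theorem comScanA_eq_scanB_rev (l1 l2 : List Char) (h : l1.length = l2.length) :
    comScanA l1 l2 = scanB l1.reverse l2.reverse "0" := by
  induction l1 generalizing l2 with
  | nil =>
    cases l2 with
    | nil => simp [comScanA, scanB]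
    | cons b bs => simp at h
  | cons a as ih =>
    cases l2 with
    | nil => simp at h
    | cons b bs =>
      simp only [List.length_cons, Nat.add_right_cancel_iff] at h
      have hlen : as.reverse.length = bs.reverse.length := by simpa using h
      simp only [comScanA, List.reverse_cons]
      rw [scanB_snoc _ _ _ _ _ hlen]
      by_cases hab : a = b
      · simp [hab, ih bs h]
      · simp [hab]

-- ===== VERDICT =====
theorem COM_NN_D_spec : Claim_equal_COM_NN_D := by
  intro n1 n2 _
  unfold Spec_COM_NN_D COM_NN_D COM_NN_D_alt
  by_cases h : n1.toList.length = n2.toList.length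
  · simp only [h, ne_eq, not_true_eq_false, if_false]
    exact comScanA_eq_scanB_rev _ _ h
  · rw [if_pos h, scanB_ne_len]
    · simp
    · simpa using h
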